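-- pv_equiv track=rewrite | github.com/ebolless/InovationWithNER | code/LSTM-CRF/utils.py | iob_ranges
-- ===== SOURCE A (Python) =====
-- def iob_ranges(tags):
--     """
--     IOB -> Ranges
--     """
--     ranges = []
--     def check_if_closing_range():
--         if i == len(tags)-1 or tags[i+1].split('-')[0] == 'O':
--             ranges.append((begin, i, type))
--
--     for i, tag in enumerate(tags):
--         if tag.split('-')[0] == 'O':
--             pass
--         elif tag.split('-')[0] == 'B':
--             begin = i
--             type = tag.split('-')[1]
--             check_if_closing_range()
--         elif tag.split('-')[0] == 'I':
--             check_if_closing_range()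
--     return ranges
-- ===== SOURCE B (Python) =====
-- def iob_ranges(tags):
--     """
--     IOB -> Ranges
--     """
--     ranges = []
--     begin = 0
--     typ = ''
--     prev = 'O'
--     for i, tag in enumerate(tags):
--         p = tag.split('-')[0]
--         if p == 'B':
--             parts = tag.split('-')
--             begin = i
--             typ = parts[1] if len(parts) > 1 else ''
--         if p == 'O' and (prev == 'B' or prev == 'I'):
--             ranges.append((begin, i - 1, typ))
--         prev = p
--     if prev == 'B' or prev == 'I':
--         ranges.append((begin, len(tags) - 1, typ))
--     return ranges
-- ===== Notes on version B (the rewrite author's own statement) =====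
-- stated objective: alternative
-- what changed: Replaces A's look-ahead closing closure (which peeks at tags[i+1] and re-splits each tag up to three times) by a single look-behind pass with explicitly initialized begin/typ/prev state, splitting each tag once and emitting a range when an 'O' follows a 'B'/'I' tag and once after the loop.
-- outside the precondition, e.g. on iob_ranges(['I-X']): A raises NameError, B returns [(0, 0, '')]; on iob_ranges(['B']): A raises IndexError, B returns [(0, 0, '')]
import Mathlib
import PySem

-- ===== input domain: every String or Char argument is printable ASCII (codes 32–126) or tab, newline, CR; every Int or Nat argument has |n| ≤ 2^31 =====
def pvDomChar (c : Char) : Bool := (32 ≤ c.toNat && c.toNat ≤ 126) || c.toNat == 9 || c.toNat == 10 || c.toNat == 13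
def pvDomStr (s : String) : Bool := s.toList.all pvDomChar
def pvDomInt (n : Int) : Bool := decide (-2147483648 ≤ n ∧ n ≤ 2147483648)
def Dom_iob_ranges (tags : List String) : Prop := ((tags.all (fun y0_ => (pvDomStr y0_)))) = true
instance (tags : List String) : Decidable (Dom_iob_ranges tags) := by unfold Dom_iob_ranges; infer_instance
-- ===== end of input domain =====

-- B replaces A's look-ahead closing closure by a single look-behind pass with initialized
-- state (objective: alternative decomposition, same O(n) cost). Equivalence is about the
-- return value; Pre_ excludes exactly the inputs on which the Python A raises.

-- tag.split('-'): sep "-" is nonempty, so PySem.Str.split? always returns some (exact)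
def pvSplitDash (tag : String) : List String := (PySem.Str.split? tag "-").getD []

-- tag.split('-')[0]: split with a nonempty sep is never [], so index 0 is its head (exact)
def pvPrefix (tag : String) : String := (pvSplitDash tag).headD ""

-- ===== PORT A =====
-- A's closing test `i == len(tags)-1 or tags[i+1].split('-')[0] == 'O'` looks one ahead;
-- with the loop rendered as structural recursion the remaining suffix is at hand, so the
-- test is `rest = [] ∨ prefix of rest.head = 'O'` (the same condition).
def pvClosingNext (rest : List String) : Bool :=
  match rest with
  | [] => true
  | t :: _ => pvPrefix t = "O"

-- A's unbound locals begin/type are one Option state (both are set together in the 'B'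
-- branch); where Python A would raise (IndexError on `tag.split('-')[1]`, NameError on an
-- unbound begin/type) the port uses defaults — Pre_iob_ranges excludes those inputs.
def pvGoA (rest : List String) (i : Nat) (bt : Option (Int × String)) :
    List (Int × Int × String) :=
  match rest with
  | [] => []
  | tag :: rest' =>
    let p := pvPrefix tag
    if p = "O" then pvGoA rest' (i + 1) bt
    else if p = "B" then
      let bt' : Option (Int × String) := some ((i : Int), (pvSplitDash tag).getD 1 "")
      if pvClosingNext rest' then
        ((bt'.getD (0, "")).1, (i : Int), (bt'.getD (0, "")).2) :: pvGoA rest' (i + 1) bt'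
      else pvGoA rest' (i + 1) bt'
    else if p = "I" then
      if pvClosingNext rest' then
        ((bt.getD (0, "")).1, (i : Int), (bt.getD (0, "")).2) :: pvGoA rest' (i + 1) bt
      else pvGoA rest' (i + 1) bt
    else pvGoA rest' (i + 1) bt

def iob_ranges (tags : List String) : List (Int × Int × String) :=
  pvGoA tags 0 none

-- ===== PORT B =====
-- transliteration of Source B: one look-behind pass; `prev` is the previous tag's prefix,
-- begin/typ are updated only at 'B' tags; a range is emitted at an 'O' after B/I, and
-- once more after the loop (there i = len(tags), so i-1 = len(tags)-1 as in Source B).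
def pvGoB (rest : List String) (i : Nat) (begin_ : Int) (typ : String) (prev : String) :
    List (Int × Int × String) :=
  match rest with
  | [] => if prev = "B" ∨ prev = "I" then [(begin_, (i : Int) - 1, typ)] else []
  | tag :: rest' =>
    let p := pvPrefix tag
    let begin' : Int := if p = "B" then (i : Int) else begin_
    let typ' : String := if p = "B" then (pvSplitDash tag).getD 1 "" else typ
    if p = "O" ∧ (prev = "B" ∨ prev = "I") then
      (begin', (i : Int) - 1, typ') :: pvGoB rest' (i + 1) begin' typ' p
    else pvGoB rest' (i + 1) begin' typ' p

def iob_ranges_alt (tags : List String) : List (Int × Int × String) :=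
  pvGoB tags 0 0 "" "O"

-- ===== PRECONDITION & SPEC =====
-- Pre_ excludes exactly the inputs on which Python A raises: a 'B'-prefixed tag with no
-- second '-' field (IndexError at type = tag.split('-')[1]) and an 'I'-prefixed tag that
-- closes a range (next tag is 'O' or it is last) with no earlier 'B' tag (NameError:
-- begin/type unbound).
def Pre_iob_ranges (tags : List String) : Prop :=
  (∀ tag ∈ tags, pvPrefix tag = "B" → 2 ≤ (pvSplitDash tag).length) ∧
  (∀ i : Nat, i < tags.length → pvPrefix (tags.getD i "") = "I" →
    (i + 1 = tags.length ∨ pvPrefix (tags.getD (i + 1) "") = "O") →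
    ∃ j : Nat, j < i ∧ pvPrefix (tags.getD j "") = "B")

instance (tags : List String) : Decidable (Pre_iob_ranges tags) := by
  unfold Pre_iob_ranges; infer_instance

def pvWitness_iob_ranges : List String := ["B-PER", "I-PER", "O", "B-LOC"]

def Spec_iob_ranges (tags : List String) (out : List (Int × Int × String)) : Prop := out = iob_ranges_alt tags
instance (tags : List String) (out : List (Int × Int × String)) : Decidable (Spec_iob_ranges tags out) := by unfold Spec_iob_ranges; infer_instance

-- ===== CLAIM (what is proved, stated in full; the proofs are below) =====
def Claim_equal_iob_ranges : Prop := ∀ (tags : List String), Dom_iob_ranges tags → Pre_iob_ranges tags → Spec_iob_ranges tags (iob_ranges tags)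

-- ===== LEMMAS AND PROOFS =====

-- a suffix is safe if no 'I' tag in it closes a range before the first 'B' tag of the suffix
def pvSafe (rest : List String) : Bool :=
  match rest with
  | [] => true
  | tag :: rest' =>
    if pvPrefix tag = "B" then true
    else if pvPrefix tag = "I" ∧ pvClosingNext rest' then false
    else pvSafe rest'

lemma pvSafe_of (ts : List String)
    (h : ∀ i : Nat, i < ts.length → pvPrefix (ts.getD i "") = "I" →
      (i + 1 = ts.length ∨ pvPrefix (ts.getD (i + 1) "") = "O") →
      ∃ j : Nat, j < i ∧ pvPrefix (ts.getD j "") = "B") :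
    pvSafe ts = true := by
  induction ts with
  | nil => rfl
  | cons t rest ih =>
    by_cases hB : pvPrefix t = "B"
    · simp [pvSafe, hB]
    · by_cases hI : pvPrefix t = "I" ∧ pvClosingNext rest
      · exfalso
        obtain ⟨j, hj, _⟩ := h 0 (by simp) hI.1 (by
          rcases rest with _ | ⟨r, rs⟩
          · left; rfl
          · right
            have := hI.2
            simpa [pvClosingNext] using this)
        omega
      · have : pvSafe rest = true := by
          apply ih
          intro i hi hIi hcl
          obtain ⟨j, hj, hjB⟩ := h (i + 1) (by simpa using Nat.succ_lt_succ hi)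
            (by simpa using hIi)
            (by rcases hcl with h1 | h2
                · left; simpa using h1
                · right; simpa using h2)
          rcases j with _ | j
          · exact absurd (by simpa using hjB) hB
          · exact ⟨j, by omega, by simpa using hjB⟩
        simp [pvSafe, hB, hI, this]

lemma pvGoB_eq_pvGoA (rest : List String) (i : Nat) (begin_ : Int) (typ : String)
    (prev : String) (bt : Option (Int × String))
    (hinv : bt = some (begin_, typ) ∨
      (bt = none ∧ begin_ = 0 ∧ typ = "" ∧ pvSafe rest = true ∧
        ((prev = "B" ∨ prev = "I") → pvClosingNext rest = false))) :
    pvGoB rest i begin_ typ prev =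
      (if (prev = "B" ∨ prev = "I") ∧ pvClosingNext rest = true
        then [(begin_, (i : Int) - 1, typ)] else []) ++ pvGoA rest i bt := by
  induction rest generalizing i begin_ typ prev bt with
  | nil =>
    by_cases hp : prev = "B" ∨ prev = "I" <;> simp [pvGoB, pvGoA, pvClosingNext, hp]
  | cons tag rest' ih =>
    by_cases hO : pvPrefix tag = "O"
    · -- current tag is 'O'
      have hnext : pvClosingNext (tag :: rest') = true := by simp [pvClosingNext, hO]
      have hinv' : bt = some (begin_, typ) ∨
          (bt = none ∧ begin_ = 0 ∧ typ = "" ∧ pvSafe rest' = true ∧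
            (("O" = "B" ∨ "O" = "I") → pvClosingNext rest' = false)) := by
        rcases hinv with h | ⟨h1, h2, h3, h4, _⟩
        · exact Or.inl h
        · refine Or.inr ⟨h1, h2, h3, ?_, by intro h; simp at h⟩
          simpa [pvSafe, hO] using h4
      have := ih (i + 1) begin_ typ "O" bt hinv'
      by_cases hp : prev = "B" ∨ prev = "I" <;>
        simp [pvGoB, pvGoA, hO, hnext, hp, this]
    · by_cases hB : pvPrefix tag = "B"
      · -- current tag is 'B'
        have hnext : pvClosingNext (tag :: rest') = false := by
          simp [pvClosingNext, hB]
        have := ih (i + 1) (i : Int) ((pvSplitDash tag).getD 1 "") "B"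
          (some ((i : Int), (pvSplitDash tag).getD 1 "")) (Or.inl rfl)
        by_cases hcl : pvClosingNext rest' = true <;>
        · simp only [hcl, true_and, true_or, if_true, if_false, Bool.false_eq_true,
            and_false, List.nil_append] at this
          push_cast at this
          simp [pvGoB, pvGoA, hB, hnext, hcl, List.getD] at this ⊢
          simpa using this
      · by_cases hI : pvPrefix tag = "I"
        · -- current tag is 'I'
          have hnext : pvClosingNext (tag :: rest') = false := by
            simp [pvClosingNext, hI]
          rcases hinv with hbt | ⟨h1, h2, h3, h4, _⟩
          · have := ih (i + 1) begin_ typ "I" bt (Or.inl hbt)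
            by_cases hcl : pvClosingNext rest' = true
            · simp [pvGoB, pvGoA, hI, hnext, this, hcl, hbt]
            · simp [pvGoB, pvGoA, hI, hnext, this, hcl]
          · have hsafe : pvSafe rest' = true ∧ ¬ (pvPrefix tag = "I" ∧ pvClosingNext rest') := by
              by_cases hc : pvPrefix tag = "I" ∧ pvClosingNext rest'
              · exfalso; have := h4; simp [pvSafe, hc] at this
              · constructor
                · have := h4
                  simp only [pvSafe, if_neg hB, if_neg hc] at this
                  exact this
                · exact hc
            have hcl : pvClosingNext rest' = false := by
              rcases hsafe with ⟨_, hnc⟩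
              by_cases h : pvClosingNext rest' = true
              · exact absurd ⟨hI, h⟩ hnc
              · simpa using h
            have := ih (i + 1) begin_ typ "I" bt
              (Or.inr ⟨h1, h2, h3, hsafe.1, fun _ => hcl⟩)
            simp [pvGoB, pvGoA, hI, hnext, this, hcl]
        · -- other prefix
          have hnext : pvClosingNext (tag :: rest') = false := by
            simp [pvClosingNext]; intro h; rw [h] at hO; simp at hO
          have hpI : ¬ (pvPrefix tag = "B" ∨ pvPrefix tag = "I") := by
            rintro (h | h) <;> [exact hB h; exact hI h]
          have hinv' : bt = some (begin_, typ) ∨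
              (bt = none ∧ begin_ = 0 ∧ typ = "" ∧ pvSafe rest' = true ∧
                ((pvPrefix tag = "B" ∨ pvPrefix tag = "I") → pvClosingNext rest' = false)) := by
            rcases hinv with h | ⟨h1, h2, h3, h4, _⟩
            · exact Or.inl h
            · refine Or.inr ⟨h1, h2, h3, ?_, fun h => absurd h hpI⟩
              have hc : ¬ (pvPrefix tag = "I" ∧ pvClosingNext rest') := fun ⟨h, _⟩ => hI h
              simpa [pvSafe, hB, hc] using h4
          have := ih (i + 1) begin_ typ (pvPrefix tag) bt hinv'
          simp [pvGoB, pvGoA, hO, hB, hI, hnext, this]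

-- ===== VERDICT (by name: the statement is the Claim_ definition above) =====
theorem iob_ranges_spec : Claim_equal_iob_ranges := by
  intro tags _ hpre
  have hsafe : pvSafe tags = true := pvSafe_of tags hpre.2
  have := pvGoB_eq_pvGoA tags 0 0 "" "O" none
    (Or.inr ⟨rfl, rfl, rfl, hsafe, by intro h; simp at h⟩)
  unfold Spec_iob_ranges iob_ranges iob_ranges_alt
  simp [this]
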